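-- pv_equiv track=rewrite | github.com/tkiet79/python-problem-in-hacker_rank | 52500167_MIDTERM ESSAY_Applied_Linear_Algebra_for_IT_(code_501032).py | get_longest_odd_streak
-- ===== SOURCE A (Python) =====
-- def get_longest_odd_streak(row_array):
--     """
--     Hàm này nhận vào một mảng 1D (một hàng)
--     và trả về độ dài của chuỗi số lẻ DÀI NHẤT.
--     """
--     max_streak = 0      # Độ dài chuỗi dài nhất tìm thấy
--     current_streak = 0  # Độ dài chuỗi hiện tại
--
--     for num in row_array:
--         if num % 2 != 0:
--             # Nếu số là lẻ, tăng chuỗi hiện tại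
--             current_streak += 1
--         else:
--             # Nếu số là chẵn, chuỗi bị ngắt
--             # Cập nhật max_streak nếu chuỗi vừa rồi dài hơn
--             max_streak = max(max_streak, current_streak)
--             # Reset chuỗi hiện tại về 0
--             current_streak = 0
--
--     # Kiểm tra lần cuối: Đề phòng trường hợp chuỗi dài nhất
--     # nằm ở cuối hàng (không có số chẵn nào ngắt nó)
--     max_streak = max(max_streak, current_streak)
--
--     return max_streak
-- ===== SOURCE B (Python) =====
-- from itertools import groupby
--
--
-- def get_longest_odd_streak(row_array):
--     return max(
--         (sum(1 for _ in g) for k, g in groupby(row_array, key=lambda x: x % 2 != 0) if k),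
--         default=0,
--     )
-- ===== Notes on version B (the rewrite author's own statement) =====
-- stated objective: idiomatic
-- what changed: Replaces the explicit two-counter loop with itertools.groupby: group the array by parity and take the max length of the odd groups (default 0).
import Mathlib
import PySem

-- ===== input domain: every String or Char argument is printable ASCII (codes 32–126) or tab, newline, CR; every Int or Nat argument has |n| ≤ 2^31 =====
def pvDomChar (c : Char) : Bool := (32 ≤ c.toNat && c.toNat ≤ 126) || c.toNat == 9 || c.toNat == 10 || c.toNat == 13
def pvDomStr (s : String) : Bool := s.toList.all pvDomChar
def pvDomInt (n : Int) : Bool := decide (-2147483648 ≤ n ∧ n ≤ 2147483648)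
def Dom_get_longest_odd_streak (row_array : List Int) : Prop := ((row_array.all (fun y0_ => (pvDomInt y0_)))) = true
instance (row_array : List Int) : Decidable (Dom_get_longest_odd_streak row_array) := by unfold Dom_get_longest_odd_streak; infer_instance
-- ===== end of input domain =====

-- B rewrites A's two-counter loop as a groupby-by-parity: max length of the odd runs (idiomatic, same cost).


-- ===== PORT A =====
-- the Python loop: state (max_streak, current_streak), final max at the end
def get_longest_odd_streak (row_array : List Int) : Int :=
  let s := row_array.foldl
    (fun (p : Int × Int) num =>
      if PySem.Int.mod num 2 ≠ 0 then (p.1, p.2 + 1) else (max p.1 p.2, 0))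
    (0, 0)
  max s.1 s.2

-- ===== PORT B =====
-- the key lambda of Source B's groupby: x % 2 != 0
def pvOddB (x : Int) : Bool := decide (PySem.Int.mod x 2 ≠ 0)

-- itertools.groupby(l, key=pvOddB), ported by hand (exact: maximal runs of equal key, in order)
def pyGroupByParity (l : List Int) : List (Bool × List Int) :=
  match l with
  | [] => []
  | x :: t =>
    let k := pvOddB x
    (k, x :: t.takeWhile (fun y => pvOddB y == k))
      :: pyGroupByParity (t.dropWhile (fun y => pvOddB y == k))
termination_by l.length
decreasing_by
  simpa using Nat.lt_succ_of_le (List.length_dropWhile_le _ _)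

-- max((sum(1 for _ in g) for k, g in groupby(...) if k), default=0)
def get_longest_odd_streak_alt (row_array : List Int) : Int :=
  (PySem.List.max?
    (((pyGroupByParity row_array).filter (fun p => p.1)).map (fun p => (p.2.length : Int)))
    (fun y => y)).getD 0

-- ===== PRECONDITION & SPEC =====
def Spec_get_longest_odd_streak (row_array : List Int) (out : Int) : Prop := out = get_longest_odd_streak_alt row_array
instance (row_array : List Int) (out : Int) : Decidable (Spec_get_longest_odd_streak row_array out) := by unfold Spec_get_longest_odd_streak; infer_instance

-- ===== CLAIM (what is proved, stated in full; the proofs are below) =====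
def Claim_equal_get_longest_odd_streak : Prop := ∀ (row_array : List Int), Dom_get_longest_odd_streak row_array → Spec_get_longest_odd_streak row_array (get_longest_odd_streak row_array)

-- ===== LEMMAS AND PROOFS =====

theorem pvOddB_eq_true {x : Int} (hx : PySem.Int.mod x 2 ≠ 0) : pvOddB x = true :=
  decide_eq_true hx

theorem pvOddB_eq_false {x : Int} (hx : PySem.Int.mod x 2 = 0) : pvOddB x = false :=
  decide_eq_false (fun h => h hx)

-- B's result computed from a group list
def pvBof (gs : List (Bool × List Int)) : Int :=
  (PySem.List.max? ((gs.filter (fun p => p.1)).map (fun p => (p.2.length : Int))) (fun y => y)).getD 0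

theorem pvBof_alt (l : List Int) :
    get_longest_odd_streak_alt l = pvBof (pyGroupByParity l) := rfl

theorem pvBof_nil : pvBof [] = 0 := rfl

theorem pvBof_cons_false (g : List Int) (gs : List (Bool × List Int)) :
    pvBof ((false, g) :: gs) = pvBof gs := by
  simp [pvBof]

theorem pvBof_nonneg (gs : List (Bool × List Int)) : 0 ≤ pvBof gs := by
  unfold pvBof
  cases h : PySem.List.max? ((gs.filter (fun p => p.1)).map (fun p => (p.2.length : Int))) (fun y => y) with
  | none => simp
  | some m =>
    have hm := PySem.List.max?_mem h
    simp only [List.mem_map] at hm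
    obtain ⟨p, _, hp⟩ := hm
    simp [← hp]

theorem pvBof_cons_true (g : List Int) (gs : List (Bool × List Int)) :
    pvBof ((true, g) :: gs) = max (g.length : Int) (pvBof gs) := by
  unfold pvBof
  simp only [List.filter_cons, if_true, List.map_cons]
  rw [PySem.List.max?_id_cons]
  have hswap : ∀ (u : List Int) (a x : Int),
      u.foldl max (max a x) = max a (u.foldl max x) := by
    intro u
    induction u with
    | nil => intro a x; rfl
    | cons y v ih =>
      intro a x
      rw [List.foldl_cons, List.foldl_cons, max_assoc, ih]
  have hfold : ∀ (xs : List Int) (a : Int),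
      xs.foldl max a = max a ((PySem.List.max? xs (fun y => y)).getD a) := by
    intro xs a
    cases xs with
    | nil => simp [PySem.List.max?]
    | cons x t =>
      rw [PySem.List.max?_id_cons, Option.getD_some, List.foldl_cons, hswap]
  rw [hfold]
  cases hm : PySem.List.max? ((gs.filter (fun p => p.1)).map (fun p => (p.2.length : Int))) (fun y => y) with
  | none => simp
  | some m =>
    have hmm := PySem.List.max?_mem hm
    simp only [List.mem_map] at hmm
    obtain ⟨p, _, hp⟩ := hmm
    have : (0:Int) ≤ m := by simp [← hp]
    simp

-- skipping an even element does not change B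
theorem pvB_even_cons (x : Int) (t : List Int) (hx : PySem.Int.mod x 2 = 0) :
    pvBof (pyGroupByParity (x :: t)) = pvBof (pyGroupByParity t) := by
  rw [pyGroupByParity]
  simp only [pvOddB_eq_false hx, pvBof_cons_false]
  have hpred : (fun y => pvOddB y == false) = (fun y => !(pvOddB y)) := by
    funext y; cases pvOddB y <;> simp
  rw [hpred]
  cases t with
  | nil => rfl
  | cons y u =>
    by_cases hy : PySem.Int.mod y 2 = 0
    · rw [List.dropWhile_cons_of_pos (by simp [pvOddB_eq_false hy])]
      conv_rhs => rw [pyGroupByParity]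
      simp only [pvOddB_eq_false hy, pvBof_cons_false, hpred]
    · rw [List.dropWhile_cons_of_neg (by simp [pvOddB_eq_true hy])]

theorem pvB_odd_cons (x : Int) (t : List Int) (hx : PySem.Int.mod x 2 ≠ 0) :
    pvBof (pyGroupByParity (x :: t)) =
      max ((1 + (t.takeWhile pvOddB).length : Int))
        (pvBof (pyGroupByParity (t.dropWhile pvOddB))) := by
  rw [pyGroupByParity]
  simp only [pvOddB_eq_true hx]
  have hpred : (fun y => pvOddB y == true) = pvOddB := by
    funext y; cases pvOddB y <;> simp
  rw [hpred, pvBof_cons_true]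
  simp [Int.add_comm]

-- reassembly of B: for any l, B l = max (leading odd-run length) (B (rest))
theorem pvB_decomp (l : List Int) :
    pvBof (pyGroupByParity l) =
      max ((l.takeWhile pvOddB).length : Int)
        (pvBof (pyGroupByParity (l.dropWhile pvOddB))) := by
  cases l with
  | nil => simp [pyGroupByParity, pvBof_nil]
  | cons x t =>
    by_cases hx : PySem.Int.mod x 2 = 0
    · rw [List.takeWhile_cons_of_neg (by simp [pvOddB_eq_false hx]),
        List.dropWhile_cons_of_neg (by simp [pvOddB_eq_false hx])]
      have h0 : (0:Int) ≤ pvBof (pyGroupByParity (x :: t)) := pvBof_nonneg _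
      simp [max_eq_right h0]
    · rw [List.takeWhile_cons_of_pos (by simp [pvOddB_eq_true hx]),
        List.dropWhile_cons_of_pos (by simp [pvOddB_eq_true hx]),
        pvB_odd_cons x t hx]
      simp [Int.add_comm]

-- the loop invariant tying A's fold to B's groupwise maximum
theorem pv_loop (t : List Int) : ∀ (ms cs : Int), 0 ≤ ms → 0 ≤ cs →
    max (t.foldl
        (fun (p : Int × Int) num =>
          if PySem.Int.mod num 2 ≠ 0 then (p.1, p.2 + 1) else (max p.1 p.2, 0))
        (ms, cs)).1
      (t.foldl
        (fun (p : Int × Int) num =>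
          if PySem.Int.mod num 2 ≠ 0 then (p.1, p.2 + 1) else (max p.1 p.2, 0))
        (ms, cs)).2
    = max ms (max (cs + ((t.takeWhile pvOddB).length : Int))
        (pvBof (pyGroupByParity (t.dropWhile pvOddB)))) := by
  induction t with
  | nil =>
    intro ms cs hms hcs
    simp [pyGroupByParity, pvBof_nil, max_eq_left hcs]
  | cons x t ih =>
    intro ms cs hms hcs
    by_cases hx : PySem.Int.mod x 2 = 0
    · rw [List.takeWhile_cons_of_neg (by simp [pvOddB_eq_false hx]),
        List.dropWhile_cons_of_neg (by simp [pvOddB_eq_false hx])]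
      rw [List.foldl_cons, if_neg (fun h => h hx)]
      rw [ih (max ms cs) 0 (le_trans hms (le_max_left _ _)) le_rfl]
      rw [pvB_even_cons x t hx, pvB_decomp t]
      simp only [List.length_nil, Int.natCast_zero, Int.zero_add, Int.add_zero]
      rw [max_assoc]
    · rw [List.takeWhile_cons_of_pos (by simp [pvOddB_eq_true hx]),
        List.dropWhile_cons_of_pos (by simp [pvOddB_eq_true hx])]
      rw [List.foldl_cons, if_pos hx]
      rw [ih ms (cs + 1) hms (by omega)]
      simp only [List.length_cons]
      push_cast
      ring_nf

-- ===== VERDICT (by name: the statement is the Claim_ definition above) =====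
theorem get_longest_odd_streak_spec : Claim_equal_get_longest_odd_streak := by
  intro l _
  show get_longest_odd_streak l = get_longest_odd_streak_alt l
  rw [pvBof_alt, pvB_decomp l]
  refine (pv_loop l 0 0 le_rfl le_rfl).trans ?_
  have hlen0 : (0:Int) ≤ ((l.takeWhile pvOddB).length : Int) := by positivity
  simp only [Int.zero_add]
  exact max_eq_right (le_max_of_le_left hlen0)
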